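-- pv_equiv track=rewrite | github.com/gablabc/PyFD | pyfd/utils.py | check_Imap_inv
-- ===== SOURCE A (Python) =====
-- def ravel(tuples):
--     """
--     turn a tuple of tuples ((a, b), (c,)) into a single tuple (a, b, c)
--     turn a list of list [[a, b], [c]] into a single list [a, b, c]
--     """
--     out = []
--     for seq_tuple in tuples:
--         for element in seq_tuple:
--             out.append(element)
--     return out
--
-- def check_Imap_inv(Imap_inv, d):
--     if Imap_inv is None:
--         Imap_inv = [[i] for i in range(d)]
--         is_full_partition = True
--     else:
--         assert type(Imap_inv) in (list, tuple), "Imap_inv must be a list or a tuple"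
--         assert type(Imap_inv[0]) in (list, tuple), "Elements of Imap_inv must be lists or tuples"
--         raveled_Imap_inv = sorted(ravel(Imap_inv))
--         assert min(raveled_Imap_inv) >= 0, "Imap_inv must have positive values"
--         assert max(raveled_Imap_inv) < d, "Imap_inv cannot exceed the value of features"
--         # Is the Imap_inv a full partition of the input space ?
--         is_full_partition = raveled_Imap_inv == list(range(d))
--     D = len(Imap_inv)
--     return Imap_inv, D, is_full_partition
-- ===== SOURCE B (Python) =====
-- def check_Imap_inv(Imap_inv, d):
--     if Imap_inv is None:
--         Imap_inv = [[i] for i in range(d)]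
--         return Imap_inv, len(Imap_inv), True
--     assert type(Imap_inv) in (list, tuple), "Imap_inv must be a list or a tuple"
--     assert type(Imap_inv[0]) in (list, tuple), "Elements of Imap_inv must be lists or tuples"
--     seen = set()
--     n = 0
--     for group in Imap_inv:
--         for i in group:
--             assert i >= 0, "Imap_inv must have positive values"
--             assert i < d, "Imap_inv cannot exceed the value of features"
--             seen.add(i)
--             n += 1
--     # d distinct in-range values are exactly 0..d-1: no sort needed
--     is_full_partition = (n == d and len(seen) == d)
--     return Imap_inv, len(Imap_inv), is_full_partition
-- ===== Notes on version B (the rewrite author's own statement) =====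
-- stated objective: simpler
-- what changed: Replaces the sort-then-compare-to-range(d) full-partition test by a single pass that counts elements and collects them in a set: d in-range values with n==d and len(set)==d are exactly 0..d-1, so no sort and no range list are built.
import Mathlib
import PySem

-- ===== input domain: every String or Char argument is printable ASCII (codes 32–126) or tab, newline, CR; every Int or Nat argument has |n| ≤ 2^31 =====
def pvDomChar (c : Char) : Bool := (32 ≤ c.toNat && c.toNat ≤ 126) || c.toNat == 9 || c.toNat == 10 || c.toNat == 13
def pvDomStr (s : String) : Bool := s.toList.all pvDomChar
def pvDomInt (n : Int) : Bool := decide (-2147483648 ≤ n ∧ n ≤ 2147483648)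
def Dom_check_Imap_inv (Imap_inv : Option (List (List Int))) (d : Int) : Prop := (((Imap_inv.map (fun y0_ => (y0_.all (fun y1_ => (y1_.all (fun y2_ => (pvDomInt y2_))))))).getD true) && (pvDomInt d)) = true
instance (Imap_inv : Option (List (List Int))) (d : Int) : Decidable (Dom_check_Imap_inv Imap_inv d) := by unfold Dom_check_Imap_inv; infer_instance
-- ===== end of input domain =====

-- B replaces A's sort-then-compare-to-range(d) full-partition test by a one-pass count + set:
-- d distinct in-range values are exactly 0..d-1 (objective: simpler — no sort, no range list).

-- ===== PORT A =====
def ravel (tuples : List (List Int)) : List Int :=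
  tuples.foldl (fun out seq_tuple => seq_tuple.foldl (fun out element => out ++ [element]) out) []

def check_Imap_inv (Imap_inv : Option (List (List Int))) (d : Int) : List (List Int) × Int × Bool :=
  match Imap_inv with
  | none =>
      -- Imap_inv = [[i] for i in range(d)]; is_full_partition = True
      let I := (PySem.List.pyRange 0 d 1).map (fun i => [i])
      (I, (I.length : Int), true)
  | some I =>
      -- the two type asserts always pass under the type convention; the min/max asserts
      -- and the Imap_inv[0]/min([]) raises pass exactly under Pre_ (excluded otherwise)
      let raveled := PySem.List.sorted (ravel I) (fun x => x) false
      let is_full_partition := decide (raveled = PySem.List.pyRange 0 d 1)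
      (I, (I.length : Int), is_full_partition)

-- ===== PORT B =====
def check_Imap_inv_alt (Imap_inv : Option (List (List Int))) (d : Int) : List (List Int) × Int × Bool :=
  match Imap_inv with
  | none =>
      let I := (PySem.List.pyRange 0 d 1).map (fun i => [i])
      (I, (I.length : Int), true)
  | some I =>
      -- seen = set(); n = 0; for group in I: for i in group: seen.add(i); n += 1
      let st := I.foldl
        (fun (st : PySem.Set Int × Int) group =>
          group.foldl (fun st i => (PySem.Set.add st.1 i, st.2 + 1)) st)
        (PySem.Set.empty, 0)
      (I, (I.length : Int), decide (st.2 = d ∧ ((PySem.Set.len st.1 : Int) = d)))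

-- ===== PRECONDITION & SPEC =====
-- Pre_ excludes exactly the inputs where A raises: a non-list Imap_inv is unrepresentable here;
-- some [] raises IndexError at Imap_inv[0]; an all-empty-groups list raises ValueError at min([]);
-- a flattened value < 0 or ≥ d fails an assert.
def Pre_check_Imap_inv (Imap_inv : Option (List (List Int))) (d : Int) : Prop :=
  (match Imap_inv with
   | none => true
   | some I => !I.flatten.isEmpty && I.flatten.all (fun x => decide (0 ≤ x) && decide (x < d))) = true
instance (Imap_inv : Option (List (List Int))) (d : Int) : Decidable (Pre_check_Imap_inv Imap_inv d) := by unfold Pre_check_Imap_inv; infer_instance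

def pvWitness_check_Imap_inv : Option (List (List Int)) × Int := (some [[0, 2], [1]], 3)

def Spec_check_Imap_inv (Imap_inv : Option (List (List Int))) (d : Int) (out : List (List Int) × Int × Bool) : Prop := out = check_Imap_inv_alt Imap_inv d
instance (Imap_inv : Option (List (List Int))) (d : Int) (out : List (List Int) × Int × Bool) : Decidable (Spec_check_Imap_inv Imap_inv d out) := by unfold Spec_check_Imap_inv; infer_instance

-- ===== CLAIM (what is proved, stated in full; the proofs are below) =====
def Claim_equal_check_Imap_inv : Prop := ∀ (Imap_inv : Option (List (List Int))) (d : Int), Dom_check_Imap_inv Imap_inv d → Pre_check_Imap_inv Imap_inv d → Spec_check_Imap_inv Imap_inv d (check_Imap_inv Imap_inv d)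


-- ===== LEMMAS AND PROOFS =====

-- A's ravel is List.flatten
theorem ravel_aux (ts : List (List Int)) (acc : List Int) :
    ts.foldl (fun out seq_tuple => seq_tuple.foldl (fun out element => out ++ [element]) out) acc
      = acc ++ ts.flatten := by
  induction ts generalizing acc with
  | nil => simp
  | cons t ts ih =>
      rw [List.foldl_cons, PySem.List.foldl_append_singleton, ih, List.append_assoc,
        List.flatten_cons]

theorem ravel_eq_flatten (ts : List (List Int)) : ravel ts = ts.flatten := by
  unfold ravel
  rw [ravel_aux ts [], List.nil_append]

-- B's inner loop over one group
theorem group_fold (g : List Int) (s : PySem.Set Int) (n : Int) :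
    g.foldl (fun (st : PySem.Set Int × Int) i => (PySem.Set.add st.1 i, st.2 + 1)) (s, n)
      = (PySem.Set.update s g, n + g.length) := by
  induction g generalizing s n with
  | nil => simp [PySem.Set.update]
  | cons x g ih => simp [List.foldl_cons, ih, PySem.Set.update_cons]; ring

-- B's double loop builds (set of flattened values, its length)
theorem pair_fold (I : List (List Int)) (s : PySem.Set Int) (n : Int) :
    I.foldl
      (fun (st : PySem.Set Int × Int) group =>
        group.foldl (fun st i => (PySem.Set.add st.1 i, st.2 + 1)) st) (s, n)
      = (PySem.Set.update s I.flatten, n + I.flatten.length) := by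
  induction I generalizing s n with
  | nil => simp [PySem.Set.update]
  | cons g I ih =>
      simp only [List.foldl_cons, group_fold, ih, List.flatten_cons,
        PySem.Set.update_append, List.length_append, Prod.mk.injEq, true_and]
      push_cast
      ring

-- length of the dedup equals the length iff the list has no duplicates
theorem nodup_of_ofList_length {xs : List Int} (h : (PySem.Set.ofList xs).length = xs.length) :
    xs.Nodup := by
  have hsub : (PySem.Set.ofList xs) ⊆ xs := fun x hx => (PySem.Set.mem_ofList _ _).1 hx
  have hsp : (PySem.Set.ofList xs).Subperm xs :=
    List.subperm_of_subset (PySem.Set.nodup_ofList xs) hsub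
  have hperm : (PySem.Set.ofList xs).Perm xs := hsp.perm_of_length_le (le_of_eq h.symm)
  exact hperm.nodup_iff.1 (PySem.Set.nodup_ofList xs)

-- the key equivalence: sorted == range(d)  ↔  count d and d distinct, for in-range values
theorem full_iff (xs : List Int) (d : Int) (hne : xs ≠ [])
    (hb : ∀ x ∈ xs, 0 ≤ x ∧ x < d) :
    (PySem.List.sorted xs (fun x => x) false = PySem.List.pyRange 0 d 1)
      ↔ ((xs.length : Int) = d ∧ ((PySem.Set.ofList xs).length : Int) = d) := by
  obtain ⟨x0, hx0⟩ := List.exists_mem_of_ne_nil xs hne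
  have hd : 0 < d := lt_of_le_of_lt (hb x0 hx0).1 (hb x0 hx0).2
  constructor
  · intro h
    have hperm : xs.Perm (PySem.List.pyRange 0 d 1) :=
      ((PySem.List.sorted_perm xs (fun x => x) false).symm.trans (h ▸ List.Perm.refl _))
    have hlen : xs.length = (PySem.List.pyRange 0 d 1).length := hperm.length_eq
    rw [PySem.List.length_pyRange_one] at hlen
    have hlen' : (xs.length : Int) = d := by omega
    have hnd : xs.Nodup := hperm.nodup_iff.2 (PySem.List.nodup_pyRange_one 0 d)
    rw [PySem.Set.ofList_eq_self_of_nodup xs hnd]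
    exact ⟨hlen', hlen'⟩
  · rintro ⟨hlen, hset⟩
    have hnd : xs.Nodup := nodup_of_ofList_length (by omega)
    have hsub : xs ⊆ PySem.List.pyRange 0 d 1 := by
      intro x hx
      exact (PySem.List.mem_pyRange_one).2 ⟨(hb x hx).1, (hb x hx).2⟩
    have hsp : xs.Subperm (PySem.List.pyRange 0 d 1) := List.subperm_of_subset hnd hsub
    have hperm : xs.Perm (PySem.List.pyRange 0 d 1) := by
      refine hsp.perm_of_length_le ?_
      rw [PySem.List.length_pyRange_one]; omega
    exact PySem.List.sorted_eq_of_perm_of_pairwise_lt xs (PySem.List.pyRange 0 d 1)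
      (fun x => x) hperm.symm (PySem.List.pairwise_lt_pyRange_one 0 d)

-- ===== VERDICT (by name: the statement is the Claim_ definition above) =====
theorem check_Imap_inv_spec : Claim_equal_check_Imap_inv := by
  intro Imap_inv d _ hpre
  unfold Spec_check_Imap_inv
  cases Imap_inv with
  | none => rfl
  | some I =>
      unfold Pre_check_Imap_inv at hpre
      simp only [Bool.and_eq_true, Bool.not_eq_true', List.isEmpty_eq_false_iff,
        List.all_eq_true, Bool.and_eq_true, decide_eq_true_eq] at hpre
      obtain ⟨hne, hb⟩ := hpre
      simp only [check_Imap_inv, check_Imap_inv_alt, ravel_eq_flatten, pair_fold,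
        PySem.Set.update_empty, PySem.Set.len, zero_add, Prod.mk.injEq, true_and]
      exact decide_eq_decide.mpr (full_iff I.flatten d hne (fun x hx => hb x hx))
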